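-- pv_equiv track=rewrite | github.com/OdedHellman/Modal-ML-Inference-Service | utils/utils.py | _chunk_even
-- ===== SOURCE A (Python) =====
-- def _chunk_even(seq, k: int):
--     """Split seq into k chunks, as evenly sized as possible."""
--     n = len(seq)
--     k = max(1, min(k, n))
--     q, r = divmod(n, k)
--     out, i = [], 0
--     for j in range(k):
--         size = q + (1 if j < r else 0)
--         out.append(seq[i : i + size])
--         i += size
--     return out
-- ===== SOURCE B (Python) =====
-- def _chunk_even(seq, k: int):
--     """Split seq into k chunks, as evenly sized as possible."""
--     n = len(seq)
--     k = max(1, min(k, n))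
--     rest = list(seq)
--     out = []
--     while k > 1:
--         size = len(rest) // k  # the last chunk gets the floor share
--         out.append(rest[len(rest) - size:])
--         del rest[len(rest) - size:]
--         k -= 1
--     out.append(rest)
--     out.reverse()
--     return out
-- ===== Notes on version B (the rewrite author's own statement) =====
-- stated objective: alternative
-- what changed: Replaced the divmod-based forward loop with a running offset by a backward greedy peeling loop: repeatedly cut the last chunk of size len(rest)//k off the tail, then reverse the collected chunks.
import Mathlib
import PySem

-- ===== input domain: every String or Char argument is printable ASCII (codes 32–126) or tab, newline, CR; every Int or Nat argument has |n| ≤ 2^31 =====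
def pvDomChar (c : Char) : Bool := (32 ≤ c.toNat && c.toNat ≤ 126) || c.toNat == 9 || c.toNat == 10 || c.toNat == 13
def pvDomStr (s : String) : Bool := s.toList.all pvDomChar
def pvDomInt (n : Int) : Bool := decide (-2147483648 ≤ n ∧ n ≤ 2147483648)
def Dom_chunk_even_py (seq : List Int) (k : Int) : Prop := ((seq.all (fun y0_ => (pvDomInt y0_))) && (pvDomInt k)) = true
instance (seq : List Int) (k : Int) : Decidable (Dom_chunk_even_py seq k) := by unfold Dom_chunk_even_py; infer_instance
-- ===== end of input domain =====

-- B replaces A's divmod/running-offset loop by a backward greedy loop: peel the last chunk of size len(rest)//k off the tail, then reverse (objective: alternative, same cost).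

-- ===== PORT A =====
-- literal transliteration: clamp k, divmod, then a fold carrying (out, i) over range(k)
def chunk_even_py (seq : List Int) (k : Int) : List (List Int) :=
  let n : Int := seq.length
  let k' : Int := max 1 (min k n)
  let q : Int := PySem.Int.floordiv n k'
  let r : Int := PySem.Int.mod n k'
  ((PySem.List.pyRange 0 k' 1).foldl
    (fun (st : List (List Int) × Int) j =>
      let size : Int := q + (if j < r then 1 else 0)
      (st.1 ++ [PySem.List.slice seq (some st.2) (some (st.2 + size))], st.2 + size))
    ([], 0)).1

-- ===== PORT B =====
-- literal transliteration of Source B's while loop: state (rest, out), peel the tail chunk of size len(rest)//k, k decreasing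
def chunkLoop : List Int → Nat → List (List Int) → List Int × List (List Int)
  | rest, 0, out => (rest, out)        -- unreachable: the loop is entered with k ≥ 1
  | rest, 1, out => (rest, out)
  | rest, (m+2), out =>
      let size : Int := PySem.Int.floordiv (rest.length : Int) ((m + 2 : Nat) : Int)
      chunkLoop (PySem.List.slice rest none (some ((rest.length : Int) - size))) (m + 1)
                (out ++ [PySem.List.slice rest (some ((rest.length : Int) - size)) none])

def chunk_even_py_alt (seq : List Int) (k : Int) : List (List Int) :=
  let n : Int := seq.length
  let k' : Int := max 1 (min k n)
  let st := chunkLoop seq k'.toNat []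
  ((st.2 ++ [st.1]).reverse)

-- ===== PRECONDITION & SPEC =====
def Spec_chunk_even_py (seq : List Int) (k : Int) (out : List (List Int)) : Prop := out = chunk_even_py_alt seq k
instance (seq : List Int) (k : Int) (out : List (List Int)) : Decidable (Spec_chunk_even_py seq k out) := by unfold Spec_chunk_even_py; infer_instance

-- ===== CLAIM (what is proved, stated in full; the proofs are below) =====
def Claim_equal_chunk_even_py : Prop := ∀ (seq : List Int) (k : Int), Dom_chunk_even_py seq k → Spec_chunk_even_py seq k (chunk_even_py seq k)

-- ===== LEMMAS AND PROOFS =====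

-- the closed-form chunk list both programs are reduced to: chunk j is seq[pos(j):pos(j+1)], pos(j) = j*q + min j r
def pvClosed (s : List Int) (K : Int) : List (List Int) :=
  (PySem.List.pyRange 0 K 1).map (fun j =>
     PySem.List.slice s (some (j * PySem.Int.floordiv s.length K + min j (PySem.Int.mod s.length K)))
                       (some ((j + 1) * PySem.Int.floordiv s.length K + min (j + 1) (PySem.Int.mod s.length K))))

-- A's loop starting at offset pos(a) produces exactly the closed-form slices over [a, a+m).
lemma chunk_loop (seq : List Int) (q r : Int) (m : Nat) :
    ∀ (a : Int) (acc : List (List Int)),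
      ((PySem.List.pyRange a (a + (m : Int)) 1).foldl
        (fun (st : List (List Int) × Int) j =>
          (st.1 ++ [PySem.List.slice seq (some st.2)
              (some (st.2 + (q + (if j < r then 1 else 0))))],
           st.2 + (q + (if j < r then 1 else 0))))
        (acc, a * q + min a r)).1
      = acc ++ (PySem.List.pyRange a (a + (m : Int)) 1).map
          (fun j => PySem.List.slice seq (some (j * q + min j r))
            (some ((j + 1) * q + min (j + 1) r))) := by
  induction m with
  | zero =>
    intro a acc
    rw [PySem.List.pyRange_one_eq_nil (by omega)]
    simp
  | succ m ih =>
    intro a acc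
    rw [PySem.List.pyRange_one_cons (by push_cast; omega)]
    have hpos : a * q + min a r + (q + (if a < r then 1 else 0))
        = (a + 1) * q + min (a + 1) r := by
      have hmin : min (a + 1) r = min a r + (if a < r then 1 else 0) := by
        split_ifs with h <;> omega
      rw [hmin, add_one_mul]; ring
    simp only [List.foldl_cons, List.map_cons]
    rw [hpos]
    have hb : a + ((m + 1 : Nat) : Int) = (a + 1) + (m : Int) := by push_cast; ring
    rw [hb]
    rw [ih (a + 1) (acc ++ [PySem.List.slice seq (some (a * q + min a r)) (some ((a + 1) * q + min (a + 1) r))])]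
    simp

-- slice bounds below the cut survive a take
lemma slice_take_eq (xs : List Int) (t a b : Int) (ha : 0 ≤ a) (hab : a ≤ b) (hbt : b ≤ t) :
    PySem.List.slice (xs.take t.toNat) (some a) (some b) = PySem.List.slice xs (some a) (some b) := by
  rw [PySem.List.slice_toNat _ ha (by omega), PySem.List.slice_toNat _ ha (by omega)]
  rw [List.drop_take, List.take_take]
  congr 1
  omega

-- B's loop, run from k = m+1 chunks, appends exactly the closed-form chunks (reversed) to out
lemma loop_eq (m : Nat) : ∀ (s : List Int) (out : List (List Int)),
    ((chunkLoop s (m + 1) out).2 ++ [(chunkLoop s (m + 1) out).1]).reverse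
      = pvClosed s ((m + 1 : Nat) : Int) ++ out.reverse := by
  induction m with
  | zero =>
    intro s out
    have h1 : ((0 + 1 : Nat) : Int) = 1 := by norm_num
    rw [show chunkLoop s (0 + 1) out = (s, out) from rfl]
    unfold pvClosed
    rw [h1, PySem.List.pyRange_one_cons (by omega), PySem.List.pyRange_one_eq_nil (by omega)]
    have hq : PySem.Int.floordiv (s.length : Int) 1 = (s.length : Int) := by
      rw [PySem.Int.floordiv_eq_ediv_of_pos (show (0:Int) < 1 by omega)]; simp
    have hr : PySem.Int.mod (s.length : Int) 1 = 0 := by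
      rw [PySem.Int.mod_eq_emod_of_pos (show (0:Int) < 1 by omega)]; simp
    simp only [List.map_cons, List.map_nil, hq, hr]
    rw [show (0 : Int) * (s.length : Int) + min 0 0 = 0 by simp,
        show (0 + 1 : Int) * (s.length : Int) + min (0 + 1) 0 = (s.length : Int) by simp]
    rw [PySem.List.slice_zero_start, PySem.List.slice_to _ (by omega)]
    simp
  | succ m ih =>
    intro s out
    set K : Int := ((m + 1 + 1 : Nat) : Int) with hK
    have hK2 : (2 : Int) ≤ K := by rw [hK]; push_cast; omega
    set n : Int := (s.length : Int) with hn
    have hn0 : 0 ≤ n := by rw [hn]; positivity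
    set q : Int := PySem.Int.floordiv n K with hq
    set r : Int := PySem.Int.mod n K with hr
    have hqr : q * K + r = n := PySem.Int.floordiv_mul_add_mod n K
    have hr0 : 0 ≤ r := PySem.Int.mod_nonneg n (by omega)
    have hrK : r < K := PySem.Int.mod_lt n (by omega)
    have hq0 : 0 ≤ q := by nlinarith
    have hqn : q ≤ n := by nlinarith
    set K' : Int := ((m + 1 : Nat) : Int) with hK'
    have hKK' : K = K' + 1 := by rw [hK, hK']; push_cast; ring
    have hK'pos : (0 : Int) < K' := by rw [hK']; push_cast; omega
    have hprod : q * K = q * K' + q := by rw [hKK']; ring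
    -- the peeled tail and remaining front
    have hfront : PySem.List.slice s none (some (n - q)) = s.take (n - q).toNat :=
      PySem.List.slice_to _ (by omega)
    have hlenf : ((s.take (n - q).toNat).length : Int) = n - q := by
      simp [hn]; omega
    -- divmod parameters of the front
    have hq' : PySem.Int.floordiv (n - q) K' = if r = K' then q + 1 else q := by
      rw [PySem.Int.floordiv_eq_iff_of_pos hK'pos]
      split_ifs with h
      · constructor <;> nlinarith
      · have hrK' : r < K' := by omega
        constructor <;> nlinarith
    have hr' : PySem.Int.mod (n - q) K' = if r = K' then 0 else r := by
      have hdm := PySem.Int.floordiv_mul_add_mod (n - q) K'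
      rw [hq'] at hdm
      split_ifs at hdm ⊢ with h
      · have e1 : (q + 1) * K' = q * K' + K' := by ring
        omega
      · omega
    -- one loop step
    rw [show chunkLoop s (m + 1 + 1) out
        = chunkLoop (PySem.List.slice s none (some ((s.length : Int) - PySem.Int.floordiv (s.length : Int) ((m + 1 + 1 : Nat) : Int)))) (m + 1)
            (out ++ [PySem.List.slice s (some ((s.length : Int) - PySem.Int.floordiv (s.length : Int) ((m + 1 + 1 : Nat) : Int))) none]) from rfl]
    rw [← hn, ← hK, ← hq, hfront, ih]
    -- split the closed form of s at its last chunk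
    unfold pvClosed
    rw [← hn, ← hq, ← hr, hlenf, hq', hr']
    rw [show K = (K - 1) + 1 by ring, show K - 1 = K' by omega,
        PySem.List.pyRange_one_succ_right (by omega)]
    rw [List.map_append, List.map_singleton]
    -- the last chunk of the closed form is the peeled tail
    have hlast : PySem.List.slice s (some (K' * q + min K' r)) (some ((K' + 1) * q + min (K' + 1) r))
        = PySem.List.slice s (some (n - q)) none := by
      have e2 : K' * q = q * K' := by ring
      have e1 : K' * q + min K' r = n - q := by
        have : min K' r = r := by omega
        omega
      have e4 : (K' + 1) * q + min (K' + 1) r = n := by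
        have : min (K' + 1) r = r := by omega
        have e3 : (K' + 1) * q = q * K' + q := by ring
        omega
      rw [e1, e4, PySem.List.slice_from _ (by omega), PySem.List.slice_toNat _ (by omega) (by omega)]
      exact List.take_of_length_le (by simp [hn])
    rw [hlast]
    -- the earlier chunks agree between front and s
    have hmap : ∀ j ∈ PySem.List.pyRange 0 K' 1,
        PySem.List.slice (s.take (n - q).toNat)
            (some (j * (if r = K' then q + 1 else q) + min j (if r = K' then 0 else r)))
            (some ((j + 1) * (if r = K' then q + 1 else q) + min (j + 1) (if r = K' then 0 else r)))
          = PySem.List.slice s (some (j * q + min j r)) (some ((j + 1) * q + min (j + 1) r)) := by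
      intro j hj
      have hjb : 0 ≤ j ∧ j < K' := by
        have := (PySem.List.mem_pyRange_one).mp hj; omega
      have hpos_eq : ∀ (i : Int), 0 ≤ i → i ≤ K' →
          i * (if r = K' then q + 1 else q) + min i (if r = K' then 0 else r) = i * q + min i r := by
        intro i h0 h1
        have e1 : i * (q + 1) = i * q + i := by ring
        split_ifs with h
        · have : min i r = i := by omega
          omega
        · rfl
      rw [hpos_eq j hjb.1 (by omega), hpos_eq (j + 1) (by omega) (by omega)]
      have hjq0 : 0 ≤ j * q := mul_nonneg hjb.1 hq0
      have hmono : j * q + min j r ≤ (j + 1) * q + min (j + 1) r := by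
        have e1 : (j + 1) * q = j * q + q := by ring
        omega
      have hub : (j + 1) * q + min (j + 1) r ≤ n - q := by
        have e1 : (j + 1) * q ≤ K' * q := by nlinarith
        have e2 : K' * q = q * K' := by ring
        have e3 : min (j + 1) r ≤ r := min_le_right _ _
        omega
      exact slice_take_eq s (n - q) _ _ (by omega) hmono hub
    rw [List.map_congr_left hmap]
    simp

-- ===== VERDICT (by name: the statement is the Claim_ definition above) =====
theorem chunk_even_py_spec : Claim_equal_chunk_even_py := by
  intro seq k _
  unfold Spec_chunk_even_py chunk_even_py chunk_even_py_alt
  simp only []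
  set n : Int := (seq.length : Int) with hn
  set k' : Int := max 1 (min k n) with hk'
  have hk1 : 1 ≤ k' := le_max_left _ _
  have hr0 : 0 ≤ PySem.Int.mod n k' := PySem.Int.mod_nonneg n (by omega)
  have hm : (0 : Int) + ((k'.toNat : Nat) : Int) = k' := by omega
  have h := chunk_loop seq (PySem.Int.floordiv n k') (PySem.Int.mod n k') k'.toNat 0 []
  have h0 : (0 : Int) * PySem.Int.floordiv n k' + min 0 (PySem.Int.mod n k') = 0 := by
    rw [min_eq_left hr0]; ring
  rw [h0, hm] at h
  rw [h]
  have hk'' : k'.toNat = (k'.toNat - 1) + 1 := by omega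
  rw [hk'']
  have hB := loop_eq (k'.toNat - 1) seq []
  rw [show (((k'.toNat - 1) + 1 : Nat) : Int) = k' by omega] at hB
  rw [hB]
  unfold pvClosed
  rw [← hn]
  simp
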